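-- pv_equiv track=rewrite | github.com/p0ss/HatCatDev | scripts/analysis/analyze_semantic_clusters.py | cluster_by_semantics
-- ===== SOURCE A (Python) =====
-- def cluster_by_semantics(parent_map, children_map, source_map):
--     """Group concepts into semantic domains based on parents and source files."""
--
--     # Define semantic domains based on SUMO structure
--     domains = {
--         'Cognitive': set(),
--         'Physical_Objects': set(),
--         'Processes': set(),
--         'Attributes': set(),
--         'Social': set(),
--         'Information': set(),
--         'Biological': set(),
--         'Artificial': set(),
--         'Temporal': set(),
--         'Spatial': set(),
--         'Abstract_Math': set(),
--         'Safety_AI': set(),  # Custom concepts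
--     }
--
--     # Key parent concepts that define domains
--     cognitive_roots = {'CognitiveAgent', 'IntentionalProcess', 'Proposition', 'Believing'}
--     physical_roots = {'Object', 'Physical', 'SelfConnectedObject', 'CorpuscularObject'}
--     process_roots = {'Process', 'IntentionalProcess', 'PhysicalProcess'}
--     attribute_roots = {'Attribute', 'InternalAttribute', 'RelationalAttribute'}
--     social_roots = {'SocialInteraction', 'Organization', 'Agreement', 'Contest'}
--     info_roots = {'Proposition', 'ContentBearingPhysical', 'Sentence', 'Formula'}
--     bio_roots = {'Organism', 'OrganicObject', 'AnatomicalStructure', 'BiologicalProcess'}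
--     artificial_roots = {'Device', 'Artifact', 'Machine', 'ComputerProgram'}
--     temporal_roots = {'TimeInterval', 'TimeDuration', 'TimePoint'}
--     spatial_roots = {'Region', 'GeographicArea', 'Direction'}
--     abstract_roots = {'Abstract', 'Quantity', 'Number', 'SetOrClass'}
--
--     # Safety/AI concepts from custom files
--     safety_sources = {
--         'AI.kif', 'ai_alignment.kif', 'ai_infrastructure.kif',
--         'cyber_security.kif', 'narrative_deception.kif',
--         'self_awareness.kif', 'situational_awareness.kif'
--     }
--
--     # Classify all concepts
--     for concept, parents in parent_map.items():
--         source = source_map.get(concept, '')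
--
--         # Check safety/AI domain first
--         if source in safety_sources:
--             domains['Safety_AI'].add(concept)
--             continue
--
--         # Check domain roots
--         if parents & cognitive_roots:
--             domains['Cognitive'].add(concept)
--         elif parents & physical_roots:
--             domains['Physical_Objects'].add(concept)
--         elif parents & process_roots:
--             domains['Processes'].add(concept)
--         elif parents & attribute_roots:
--             domains['Attributes'].add(concept)
--         elif parents & social_roots:
--             domains['Social'].add(concept)
--         elif parents & info_roots:
--             domains['Information'].add(concept)
--         elif parents & bio_roots:
--             domains['Biological'].add(concept)
--         elif parents & artificial_roots:
--             domains['Artificial'].add(concept)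
--         elif parents & temporal_roots:
--             domains['Temporal'].add(concept)
--         elif parents & spatial_roots:
--             domains['Spatial'].add(concept)
--         elif parents & abstract_roots:
--             domains['Abstract_Math'].add(concept)
--
--     return domains
-- ===== SOURCE B (Python) =====
-- def cluster_by_semantics(parent_map, children_map, source_map):
--     """Group concepts into semantic domains based on parents and source files.
--
--     Alternative structure: instead of a per-concept if/elif chain, do one pass
--     per domain over parent_map, keeping a cumulative union `seen` of the roots
--     of all earlier domains so that "an earlier domain already matched" becomes
--     "parents intersect seen"."""
--
--     safety_sources = {
--         'AI.kif', 'ai_alignment.kif', 'ai_infrastructure.kif',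
--         'cyber_security.kif', 'narrative_deception.kif',
--         'self_awareness.kif', 'situational_awareness.kif'
--     }
--
--     rules = [
--         ('Cognitive', {'CognitiveAgent', 'IntentionalProcess', 'Proposition', 'Believing'}),
--         ('Physical_Objects', {'Object', 'Physical', 'SelfConnectedObject', 'CorpuscularObject'}),
--         ('Processes', {'Process', 'IntentionalProcess', 'PhysicalProcess'}),
--         ('Attributes', {'Attribute', 'InternalAttribute', 'RelationalAttribute'}),
--         ('Social', {'SocialInteraction', 'Organization', 'Agreement', 'Contest'}),
--         ('Information', {'Proposition', 'ContentBearingPhysical', 'Sentence', 'Formula'}),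
--         ('Biological', {'Organism', 'OrganicObject', 'AnatomicalStructure', 'BiologicalProcess'}),
--         ('Artificial', {'Device', 'Artifact', 'Machine', 'ComputerProgram'}),
--         ('Temporal', {'TimeInterval', 'TimeDuration', 'TimePoint'}),
--         ('Spatial', {'Region', 'GeographicArea', 'Direction'}),
--         ('Abstract_Math', {'Abstract', 'Quantity', 'Number', 'SetOrClass'}),
--     ]
--
--     def is_safety(concept):
--         return source_map.get(concept, '') in safety_sources
--
--     result = {}
--     seen = set()
--     for name, roots in rules:
--         result[name] = {c for c, ps in parent_map.items()
--                         if not is_safety(c) and ps & roots and not ps & seen}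
--         seen |= roots
--     result['Safety_AI'] = {c for c in parent_map if is_safety(c)}
--     return result
-- ===== Notes on version B (the rewrite author's own statement) =====
-- stated objective: alternative
-- what changed: Replaces the per-concept if/elif chain over 11 hardcoded root sets by a per-domain pass: for each domain in priority order it selects in one comprehension the concepts whose parents meet that domain's roots but not the cumulative union 'seen' of all earlier domains' roots, so the chain's first-match priority becomes an intersection test against an accumulated root union.
import Mathlib
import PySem

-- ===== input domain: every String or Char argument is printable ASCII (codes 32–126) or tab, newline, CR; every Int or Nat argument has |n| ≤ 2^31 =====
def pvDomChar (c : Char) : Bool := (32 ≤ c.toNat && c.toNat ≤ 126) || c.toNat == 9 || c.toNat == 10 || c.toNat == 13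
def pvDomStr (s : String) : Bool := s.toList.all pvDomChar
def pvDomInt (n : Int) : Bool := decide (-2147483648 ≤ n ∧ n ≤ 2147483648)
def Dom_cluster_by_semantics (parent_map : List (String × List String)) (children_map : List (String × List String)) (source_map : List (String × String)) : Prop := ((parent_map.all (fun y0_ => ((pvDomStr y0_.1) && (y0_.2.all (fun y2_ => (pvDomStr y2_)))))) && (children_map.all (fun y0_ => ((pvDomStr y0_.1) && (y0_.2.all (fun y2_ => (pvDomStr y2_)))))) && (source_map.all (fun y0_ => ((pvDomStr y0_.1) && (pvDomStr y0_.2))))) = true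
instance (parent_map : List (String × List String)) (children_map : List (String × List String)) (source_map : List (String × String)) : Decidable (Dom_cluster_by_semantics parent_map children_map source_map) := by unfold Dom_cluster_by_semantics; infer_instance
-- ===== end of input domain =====

-- B replaces A's per-concept if/elif chain by one pass per domain with a cumulative
-- union of earlier domains' roots (alternative structure, same results).


-- ===== PORT A =====
-- shared literal constants (the root sets / safety sources of the Python)
def pvCognitiveRoots : List String := ["CognitiveAgent", "IntentionalProcess", "Proposition", "Believing"]
def pvPhysicalRoots : List String := ["Object", "Physical", "SelfConnectedObject", "CorpuscularObject"]
def pvProcessRoots : List String := ["Process", "IntentionalProcess", "PhysicalProcess"]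
def pvAttributeRoots : List String := ["Attribute", "InternalAttribute", "RelationalAttribute"]
def pvSocialRoots : List String := ["SocialInteraction", "Organization", "Agreement", "Contest"]
def pvInfoRoots : List String := ["Proposition", "ContentBearingPhysical", "Sentence", "Formula"]
def pvBioRoots : List String := ["Organism", "OrganicObject", "AnatomicalStructure", "BiologicalProcess"]
def pvArtificialRoots : List String := ["Device", "Artifact", "Machine", "ComputerProgram"]
def pvTemporalRoots : List String := ["TimeInterval", "TimeDuration", "TimePoint"]
def pvSpatialRoots : List String := ["Region", "GeographicArea", "Direction"]
def pvAbstractRoots : List String := ["Abstract", "Quantity", "Number", "SetOrClass"]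
def pvSafetySources : List String := ["AI.kif", "ai_alignment.kif", "ai_infrastructure.kif", "cyber_security.kif", "narrative_deception.kif", "self_awareness.kif", "situational_awareness.kif"]

-- 'parents & roots' used as a truth value: the intersection is non-empty
def pvInter (xs ys : List String) : Bool := xs.any (fun x => ys.contains x)

-- the 12 sets the Python keeps in its `domains` dict of fixed keys
structure PvDomains where
  (cog phy pro att soc inf bio art tem spa abs saf : List String)
deriving Repr, DecidableEq

-- one iteration of A's per-concept loop (safety guard, then the if/elif chain)
def pvStepA (sm : List (String × String)) (st : PvDomains) (e : String × List String) : PvDomains :=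
  let c := e.1
  let parents := e.2
  let source := PySem.Dict.getD (PySem.Dict.mk sm) c ""
  if pvSafetySources.contains source then { st with saf := PySem.Set.add st.saf c }
  else if pvInter parents pvCognitiveRoots then { st with cog := PySem.Set.add st.cog c }
  else if pvInter parents pvPhysicalRoots then { st with phy := PySem.Set.add st.phy c }
  else if pvInter parents pvProcessRoots then { st with pro := PySem.Set.add st.pro c }
  else if pvInter parents pvAttributeRoots then { st with att := PySem.Set.add st.att c }
  else if pvInter parents pvSocialRoots then { st with soc := PySem.Set.add st.soc c }
  else if pvInter parents pvInfoRoots then { st with inf := PySem.Set.add st.inf c }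
  else if pvInter parents pvBioRoots then { st with bio := PySem.Set.add st.bio c }
  else if pvInter parents pvArtificialRoots then { st with art := PySem.Set.add st.art c }
  else if pvInter parents pvTemporalRoots then { st with tem := PySem.Set.add st.tem c }
  else if pvInter parents pvSpatialRoots then { st with spa := PySem.Set.add st.spa c }
  else if pvInter parents pvAbstractRoots then { st with abs := PySem.Set.add st.abs c }
  else st

def cluster_by_semantics (parent_map : List (String × List String)) (children_map : List (String × List String)) (source_map : List (String × String)) : List (String × List String) :=
  let st := parent_map.foldl (pvStepA source_map) ⟨[], [], [], [], [], [], [], [], [], [], [], []⟩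
  [("Cognitive", st.cog), ("Physical_Objects", st.phy), ("Processes", st.pro),
   ("Attributes", st.att), ("Social", st.soc), ("Information", st.inf),
   ("Biological", st.bio), ("Artificial", st.art), ("Temporal", st.tem),
   ("Spatial", st.spa), ("Abstract_Math", st.abs), ("Safety_AI", st.saf)]

-- ===== PORT B =====
def pvRules : List (String × List String) :=
  [("Cognitive", pvCognitiveRoots), ("Physical_Objects", pvPhysicalRoots),
   ("Processes", pvProcessRoots), ("Attributes", pvAttributeRoots),
   ("Social", pvSocialRoots), ("Information", pvInfoRoots),
   ("Biological", pvBioRoots), ("Artificial", pvArtificialRoots),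
   ("Temporal", pvTemporalRoots), ("Spatial", pvSpatialRoots),
   ("Abstract_Math", pvAbstractRoots)]

def pvIsSafety (sm : List (String × String)) (c : String) : Bool :=
  pvSafetySources.contains (PySem.Dict.getD (PySem.Dict.mk sm) c "")

-- {c for c, ps in parent_map.items() if not is_safety(c) and ps & roots and not ps & seen}
def pvMembers (pm : List (String × List String)) (sm : List (String × String)) (roots seen : List String) : List String :=
  pm.foldl (fun s e => if !pvIsSafety sm e.1 && pvInter e.2 roots && !pvInter e.2 seen then PySem.Set.add s e.1 else s) []

def cluster_by_semantics_alt (parent_map : List (String × List String)) (children_map : List (String × List String)) (source_map : List (String × String)) : List (String × List String) :=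
  let acc := pvRules.foldl
    (fun (acc : List (String × List String) × List String) rule =>
      (acc.1 ++ [(rule.1, pvMembers parent_map source_map rule.2 acc.2)],
       PySem.Set.update acc.2 rule.2))
    ([], [])
  acc.1 ++ [("Safety_AI",
    parent_map.foldl (fun s e => if pvIsSafety source_map e.1 then PySem.Set.add s e.1 else s) [])]

-- ===== PRECONDITION & SPEC =====
def Spec_cluster_by_semantics (parent_map : List (String × List String)) (children_map : List (String × List String)) (source_map : List (String × String)) (out : List (String × List String)) : Prop := out = cluster_by_semantics_alt parent_map children_map source_map
instance (parent_map : List (String × List String)) (children_map : List (String × List String)) (source_map : List (String × String)) (out : List (String × List String)) : Decidable (Spec_cluster_by_semantics parent_map children_map source_map out) := by unfold Spec_cluster_by_semantics; infer_instance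

-- ===== CLAIM (what is proved, stated in full; the proofs are below) =====
def Claim_equal_cluster_by_semantics : Prop := ∀ (parent_map : List (String × List String)) (children_map : List (String × List String)) (source_map : List (String × String)), Dom_cluster_by_semantics parent_map children_map source_map → Spec_cluster_by_semantics parent_map children_map source_map (cluster_by_semantics parent_map children_map source_map)


-- ===== LEMMAS AND PROOFS =====

-- cumulative `seen` sets after 0,1,…,10 rules of B's loop
def pvS0 : List String := []
def pvS1 : List String := PySem.Set.update pvS0 pvCognitiveRoots
def pvS2 : List String := PySem.Set.update pvS1 pvPhysicalRoots
def pvS3 : List String := PySem.Set.update pvS2 pvProcessRoots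
def pvS4 : List String := PySem.Set.update pvS3 pvAttributeRoots
def pvS5 : List String := PySem.Set.update pvS4 pvSocialRoots
def pvS6 : List String := PySem.Set.update pvS5 pvInfoRoots
def pvS7 : List String := PySem.Set.update pvS6 pvBioRoots
def pvS8 : List String := PySem.Set.update pvS7 pvArtificialRoots
def pvS9 : List String := PySem.Set.update pvS8 pvTemporalRoots
def pvS10 : List String := PySem.Set.update pvS9 pvSpatialRoots

-- generalised member pass (pvMembers with an arbitrary start accumulator)
def pvMF (pm : List (String × List String)) (sm : List (String × String)) (roots seen : List String) (s : List String) : List String :=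
  pm.foldl (fun s e => if !pvIsSafety sm e.1 && pvInter e.2 roots && !pvInter e.2 seen then PySem.Set.add s e.1 else s) s

def pvMFSafe (pm : List (String × List String)) (sm : List (String × String)) (s : List String) : List String :=
  pm.foldl (fun s e => if pvIsSafety sm e.1 then PySem.Set.add s e.1 else s) s

theorem pvInter_true_iff (ps ys : List String) : pvInter ps ys = true ↔ ∃ x ∈ ps, x ∈ ys := by
  simp [pvInter]

theorem pvInter_S0 (ps : List String) : pvInter ps pvS0 = false := by
  simp [pvInter, pvS0]

theorem pvInter_update (ps s r : List String) :
    pvInter ps (PySem.Set.update s r) = (pvInter ps s || pvInter ps r) := by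
  rw [Bool.eq_iff_iff, Bool.or_eq_true, pvInter_true_iff, pvInter_true_iff, pvInter_true_iff]
  constructor
  · rintro ⟨x, hx, hm⟩
    rcases (PySem.Set.mem_update _ _ _).mp hm with h | h
    · exact Or.inl ⟨x, hx, h⟩
    · exact Or.inr ⟨x, hx, h⟩
  · rintro (⟨x, hx, h⟩ | ⟨x, hx, h⟩) <;> exact ⟨x, hx, (PySem.Set.mem_update _ _ _).mpr (by tauto)⟩

theorem pvInterS1 (ps : List String) : pvInter ps pvS1 = pvInter ps pvCognitiveRoots := by
  simp only [pvS1, pvInter_update, pvInter_S0, Bool.false_or]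

theorem pvInterS2 (ps : List String) : pvInter ps pvS2 = (pvInter ps pvCognitiveRoots || pvInter ps pvPhysicalRoots) := by
  simp only [pvS2, pvInter_update, pvInterS1]

theorem pvInterS3 (ps : List String) : pvInter ps pvS3 = ((pvInter ps pvCognitiveRoots || pvInter ps pvPhysicalRoots) || pvInter ps pvProcessRoots) := by
  simp only [pvS3, pvInter_update, pvInterS2]

theorem pvInterS4 (ps : List String) : pvInter ps pvS4 = (((pvInter ps pvCognitiveRoots || pvInter ps pvPhysicalRoots) || pvInter ps pvProcessRoots) || pvInter ps pvAttributeRoots) := by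
  simp only [pvS4, pvInter_update, pvInterS3]

theorem pvInterS5 (ps : List String) : pvInter ps pvS5 = ((((pvInter ps pvCognitiveRoots || pvInter ps pvPhysicalRoots) || pvInter ps pvProcessRoots) || pvInter ps pvAttributeRoots) || pvInter ps pvSocialRoots) := by
  simp only [pvS5, pvInter_update, pvInterS4]

theorem pvInterS6 (ps : List String) : pvInter ps pvS6 = (((((pvInter ps pvCognitiveRoots || pvInter ps pvPhysicalRoots) || pvInter ps pvProcessRoots) || pvInter ps pvAttributeRoots) || pvInter ps pvSocialRoots) || pvInter ps pvInfoRoots) := by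
  simp only [pvS6, pvInter_update, pvInterS5]

theorem pvInterS7 (ps : List String) : pvInter ps pvS7 = ((((((pvInter ps pvCognitiveRoots || pvInter ps pvPhysicalRoots) || pvInter ps pvProcessRoots) || pvInter ps pvAttributeRoots) || pvInter ps pvSocialRoots) || pvInter ps pvInfoRoots) || pvInter ps pvBioRoots) := by
  simp only [pvS7, pvInter_update, pvInterS6]

theorem pvInterS8 (ps : List String) : pvInter ps pvS8 = (((((((pvInter ps pvCognitiveRoots || pvInter ps pvPhysicalRoots) || pvInter ps pvProcessRoots) || pvInter ps pvAttributeRoots) || pvInter ps pvSocialRoots) || pvInter ps pvInfoRoots) || pvInter ps pvBioRoots) || pvInter ps pvArtificialRoots) := by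
  simp only [pvS8, pvInter_update, pvInterS7]

theorem pvInterS9 (ps : List String) : pvInter ps pvS9 = ((((((((pvInter ps pvCognitiveRoots || pvInter ps pvPhysicalRoots) || pvInter ps pvProcessRoots) || pvInter ps pvAttributeRoots) || pvInter ps pvSocialRoots) || pvInter ps pvInfoRoots) || pvInter ps pvBioRoots) || pvInter ps pvArtificialRoots) || pvInter ps pvTemporalRoots) := by
  simp only [pvS9, pvInter_update, pvInterS8]

theorem pvInterS10 (ps : List String) : pvInter ps pvS10 = (((((((((pvInter ps pvCognitiveRoots || pvInter ps pvPhysicalRoots) || pvInter ps pvProcessRoots) || pvInter ps pvAttributeRoots) || pvInter ps pvSocialRoots) || pvInter ps pvInfoRoots) || pvInter ps pvBioRoots) || pvInter ps pvArtificialRoots) || pvInter ps pvTemporalRoots) || pvInter ps pvSpatialRoots) := by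
  simp only [pvS10, pvInter_update, pvInterS9]

-- B's per-concept test for one rule, as a named condition
set_option maxHeartbeats 1600000 in
theorem pvStepA_comp (sm : List (String × String)) (st : PvDomains) (c : String) (ps : List String) :
    pvStepA sm st (c, ps) =
      ⟨(if !pvIsSafety sm c && pvInter ps pvCognitiveRoots && !pvInter ps pvS0 then PySem.Set.add st.cog c else st.cog),
       (if !pvIsSafety sm c && pvInter ps pvPhysicalRoots && !pvInter ps pvS1 then PySem.Set.add st.phy c else st.phy),
       (if !pvIsSafety sm c && pvInter ps pvProcessRoots && !pvInter ps pvS2 then PySem.Set.add st.pro c else st.pro),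
       (if !pvIsSafety sm c && pvInter ps pvAttributeRoots && !pvInter ps pvS3 then PySem.Set.add st.att c else st.att),
       (if !pvIsSafety sm c && pvInter ps pvSocialRoots && !pvInter ps pvS4 then PySem.Set.add st.soc c else st.soc),
       (if !pvIsSafety sm c && pvInter ps pvInfoRoots && !pvInter ps pvS5 then PySem.Set.add st.inf c else st.inf),
       (if !pvIsSafety sm c && pvInter ps pvBioRoots && !pvInter ps pvS6 then PySem.Set.add st.bio c else st.bio),
       (if !pvIsSafety sm c && pvInter ps pvArtificialRoots && !pvInter ps pvS7 then PySem.Set.add st.art c else st.art),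
       (if !pvIsSafety sm c && pvInter ps pvTemporalRoots && !pvInter ps pvS8 then PySem.Set.add st.tem c else st.tem),
       (if !pvIsSafety sm c && pvInter ps pvSpatialRoots && !pvInter ps pvS9 then PySem.Set.add st.spa c else st.spa),
       (if !pvIsSafety sm c && pvInter ps pvAbstractRoots && !pvInter ps pvS10 then PySem.Set.add st.abs c else st.abs),
       (if pvIsSafety sm c then PySem.Set.add st.saf c else st.saf)⟩ := by
  simp only [pvStepA, pvIsSafety]
  by_cases hS : PySem.Dict.getD (PySem.Dict.mk sm) c "" ∈ pvSafetySources
  · simp [hS]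
  · by_cases h0 : pvInter ps pvCognitiveRoots = true
    · simp [hS, h0, pvInter_S0, pvInterS1, pvInterS2, pvInterS3, pvInterS4, pvInterS5, pvInterS6, pvInterS7, pvInterS8, pvInterS9, pvInterS10]
    · rw [Bool.not_eq_true] at h0
      by_cases h1 : pvInter ps pvPhysicalRoots = true
      · simp [hS, h0, h1, pvInter_S0, pvInterS1, pvInterS2, pvInterS3, pvInterS4, pvInterS5, pvInterS6, pvInterS7, pvInterS8, pvInterS9, pvInterS10]
      · rw [Bool.not_eq_true] at h1
        by_cases h2 : pvInter ps pvProcessRoots = true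
        · simp [hS, h0, h1, h2, pvInter_S0, pvInterS1, pvInterS2, pvInterS3, pvInterS4, pvInterS5, pvInterS6, pvInterS7, pvInterS8, pvInterS9, pvInterS10]
        · rw [Bool.not_eq_true] at h2
          by_cases h3 : pvInter ps pvAttributeRoots = true
          · simp [hS, h0, h1, h2, h3, pvInter_S0, pvInterS1, pvInterS2, pvInterS3, pvInterS4, pvInterS5, pvInterS6, pvInterS7, pvInterS8, pvInterS9, pvInterS10]
          · rw [Bool.not_eq_true] at h3
            by_cases h4 : pvInter ps pvSocialRoots = true
            · simp [hS, h0, h1, h2, h3, h4, pvInter_S0, pvInterS1, pvInterS2, pvInterS3, pvInterS4, pvInterS5, pvInterS6, pvInterS7, pvInterS8, pvInterS9, pvInterS10]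
            · rw [Bool.not_eq_true] at h4
              by_cases h5 : pvInter ps pvInfoRoots = true
              · simp [hS, h0, h1, h2, h3, h4, h5, pvInter_S0, pvInterS1, pvInterS2, pvInterS3, pvInterS4, pvInterS5, pvInterS6, pvInterS7, pvInterS8, pvInterS9, pvInterS10]
              · rw [Bool.not_eq_true] at h5
                by_cases h6 : pvInter ps pvBioRoots = true
                · simp [hS, h0, h1, h2, h3, h4, h5, h6, pvInter_S0, pvInterS1, pvInterS2, pvInterS3, pvInterS4, pvInterS5, pvInterS6, pvInterS7, pvInterS8, pvInterS9, pvInterS10]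
                · rw [Bool.not_eq_true] at h6
                  by_cases h7 : pvInter ps pvArtificialRoots = true
                  · simp [hS, h0, h1, h2, h3, h4, h5, h6, h7, pvInter_S0, pvInterS1, pvInterS2, pvInterS3, pvInterS4, pvInterS5, pvInterS6, pvInterS7, pvInterS8, pvInterS9, pvInterS10]
                  · rw [Bool.not_eq_true] at h7
                    by_cases h8 : pvInter ps pvTemporalRoots = true
                    · simp [hS, h0, h1, h2, h3, h4, h5, h6, h7, h8, pvInter_S0, pvInterS1, pvInterS2, pvInterS3, pvInterS4, pvInterS5, pvInterS6, pvInterS7, pvInterS8, pvInterS9, pvInterS10]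
                    · rw [Bool.not_eq_true] at h8
                      by_cases h9 : pvInter ps pvSpatialRoots = true
                      · simp [hS, h0, h1, h2, h3, h4, h5, h6, h7, h8, h9, pvInter_S0, pvInterS1, pvInterS2, pvInterS3, pvInterS4, pvInterS5, pvInterS6, pvInterS7, pvInterS8, pvInterS9, pvInterS10]
                      · rw [Bool.not_eq_true] at h9
                        by_cases h10 : pvInter ps pvAbstractRoots = true
                        · simp [hS, h0, h1, h2, h3, h4, h5, h6, h7, h8, h9, h10, pvInter_S0, pvInterS1, pvInterS2, pvInterS3, pvInterS4, pvInterS5, pvInterS6, pvInterS7, pvInterS8, pvInterS9, pvInterS10]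
                        · rw [Bool.not_eq_true] at h10
                          simp [hS, h0, h1, h2, h3, h4, h5, h6, h7, h8, h9, h10, pvInter_S0, pvInterS1, pvInterS2, pvInterS3, pvInterS4, pvInterS5, pvInterS6, pvInterS7, pvInterS8, pvInterS9, pvInterS10]

theorem pvFoldA_eq (pm : List (String × List String)) (sm : List (String × String)) (st : PvDomains) :
    pm.foldl (pvStepA sm) st =
      ⟨pvMF pm sm pvCognitiveRoots pvS0 st.cog, pvMF pm sm pvPhysicalRoots pvS1 st.phy,
       pvMF pm sm pvProcessRoots pvS2 st.pro, pvMF pm sm pvAttributeRoots pvS3 st.att,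
       pvMF pm sm pvSocialRoots pvS4 st.soc, pvMF pm sm pvInfoRoots pvS5 st.inf,
       pvMF pm sm pvBioRoots pvS6 st.bio, pvMF pm sm pvArtificialRoots pvS7 st.art,
       pvMF pm sm pvTemporalRoots pvS8 st.tem, pvMF pm sm pvSpatialRoots pvS9 st.spa,
       pvMF pm sm pvAbstractRoots pvS10 st.abs, pvMFSafe pm sm st.saf⟩ := by
  induction pm generalizing st with
  | nil => rfl
  | cons e pm ih =>
    obtain ⟨c, ps⟩ := e
    rw [List.foldl_cons, ih, pvStepA_comp]
    simp only [pvMF, pvMFSafe, List.foldl_cons]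

theorem pvAlt_unfold (pm cm : List (String × List String)) (sm : List (String × String)) :
    cluster_by_semantics_alt pm cm sm =
      [("Cognitive", pvMF pm sm pvCognitiveRoots pvS0 []),
       ("Physical_Objects", pvMF pm sm pvPhysicalRoots pvS1 []),
       ("Processes", pvMF pm sm pvProcessRoots pvS2 []),
       ("Attributes", pvMF pm sm pvAttributeRoots pvS3 []),
       ("Social", pvMF pm sm pvSocialRoots pvS4 []),
       ("Information", pvMF pm sm pvInfoRoots pvS5 []),
       ("Biological", pvMF pm sm pvBioRoots pvS6 []),
       ("Artificial", pvMF pm sm pvArtificialRoots pvS7 []),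
       ("Temporal", pvMF pm sm pvTemporalRoots pvS8 []),
       ("Spatial", pvMF pm sm pvSpatialRoots pvS9 []),
       ("Abstract_Math", pvMF pm sm pvAbstractRoots pvS10 []),
       ("Safety_AI", pvMFSafe pm sm [])] := by
  simp only [cluster_by_semantics_alt, pvRules, List.foldl_cons, List.foldl_nil,
             pvMembers, pvMF, pvMFSafe, pvS0, pvS1, pvS2, pvS3, pvS4, pvS5, pvS6, pvS7,
             pvS8, pvS9, pvS10, List.nil_append, List.cons_append]
  rfl

-- ===== VERDICT (by name: the statement is the Claim_ definition above) =====
theorem cluster_by_semantics_spec : Claim_equal_cluster_by_semantics := by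
  intro pm cm sm _
  unfold Spec_cluster_by_semantics
  rw [pvAlt_unfold]
  show (let st := pm.foldl (pvStepA sm) ⟨[], [], [], [], [], [], [], [], [], [], [], []⟩
        [("Cognitive", st.cog), ("Physical_Objects", st.phy), ("Processes", st.pro),
         ("Attributes", st.att), ("Social", st.soc), ("Information", st.inf),
         ("Biological", st.bio), ("Artificial", st.art), ("Temporal", st.tem),
         ("Spatial", st.spa), ("Abstract_Math", st.abs), ("Safety_AI", st.saf)]) = _
  rw [pvFoldA_eq]
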